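-- pv_equiv track=rewrite | github.com/jluo41/NLPText | nlptext/utils/infrastructure.py | modify_wordBoundary_with_hyperBoundary
-- ===== SOURCE A (Python) =====
-- def modify_wordBoundary_with_hyperBoundary(pos_sent, anno_sent):
--     # return the new word_boundary with BIO tagScheme.
--     pos_sent = [i.replace('-S', '-B').replace('-E', '-I') for i in pos_sent]
--
--     for idx, tag in enumerate(anno_sent):
--         if ('-B' == anno_sent[idx][-2:]  or '-S' == anno_sent[idx][-2:]):
--             if pos_sent[idx][-2:] != '-B':
--                 # pprint([anno_sent[idx], pos_sent[idx]])
--                 pos_sent[idx] = pos_sent[idx].split('-')[0] + '-B'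
--
--         if ('-E' == anno_sent[idx][-2:]  or '-S' == anno_sent[idx][-2:]) and idx + 1 < len(pos_sent):
--             if pos_sent[idx+1][-2:] != '-B':
--                 # pprint([anno_sent[idx], pos_sent[idx], pos_sent[idx+1]])
--                 # pprint(list(zip(anno_sent, pos_sent)))
--                 pos_sent[idx+1] = pos_sent[idx+1].split('-')[0] + '-B'
--
--     return pos_sent
-- ===== SOURCE B (Python) =====
-- def modify_wordBoundary_with_hyperBoundary(pos_sent, anno_sent):
--     # streaming rewrite: consume pos/anno tags in lockstep, carrying a single
--     # 'next token must start a word' flag instead of A's in-place look-ahead writes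
--     out = []
--     carry = False
--     ann = iter(anno_sent)
--     for tok in pos_sent:
--         a = next(ann, None)
--         t = tok.replace('-S', '-B').replace('-E', '-I')
--         if (carry or (a is not None and a.endswith(('-B', '-S')))) and not t.endswith('-B'):
--             t = t.split('-')[0] + '-B'
--         out.append(t)
--         carry = a is not None and a.endswith(('-E', '-S'))
--     return out
-- ===== Notes on version B (the rewrite author's own statement) =====
-- stated objective: alternative
-- what changed: Replaces A's index-based pass that mutates the list in place with look-ahead writes at i and i+1 by a streaming rewrite: pos and anno tags are consumed in lockstep (iter/next) with one carried 'force -B' boolean flag, building the output without any indexing or mutation.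
import Mathlib
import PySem

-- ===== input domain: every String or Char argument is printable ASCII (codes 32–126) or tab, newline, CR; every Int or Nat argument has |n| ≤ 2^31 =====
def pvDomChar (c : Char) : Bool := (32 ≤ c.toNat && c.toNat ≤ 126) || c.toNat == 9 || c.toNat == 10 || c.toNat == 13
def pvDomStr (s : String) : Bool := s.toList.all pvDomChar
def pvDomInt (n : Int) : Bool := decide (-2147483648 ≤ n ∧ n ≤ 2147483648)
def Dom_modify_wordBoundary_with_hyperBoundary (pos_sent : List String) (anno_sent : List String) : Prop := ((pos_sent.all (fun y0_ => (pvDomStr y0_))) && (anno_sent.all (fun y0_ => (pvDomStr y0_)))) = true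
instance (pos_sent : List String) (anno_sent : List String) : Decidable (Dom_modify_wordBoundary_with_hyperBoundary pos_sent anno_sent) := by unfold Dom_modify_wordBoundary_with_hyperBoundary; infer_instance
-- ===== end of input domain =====

-- B replaces A's index-based pass with in-place look-ahead writes at i and i+1 by a streaming
-- rewrite: pos and anno tags are consumed in lockstep with a single carried 'force -B' flag,
-- never indexing and never mutating (objective: alternative decomposition).
-- A rebinds pos_sent to a fresh list, so neither version mutates the caller's arguments.

-- ===== PORT A =====
-- shared pieces of both Pythons: i.replace('-S','-B').replace('-E','-I'), s[-2:], s.split('-')[0] + '-B'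
def pvRepl (s : String) : String := PySem.Str.replace (PySem.Str.replace s "-S" "-B") "-E" "-I"
def pvTail2 (s : String) : String := PySem.Str.slice s (some (-2)) none
def pvFixB (s : String) : String := ((PySem.Str.split? s "-").getD []).getD 0 "" ++ "-B"

-- the body of A's for-loop (pos_sent[idx] may be an IndexError in Python: excluded by Pre_)
def pvStepA (anno_sent : List String) (pos : List String) (p : Int × String) : List String :=
  let idx := p.1
  let pos1 :=
    if pvTail2 (PySem.List.pyGetD anno_sent idx "") = "-B" ∨
       pvTail2 (PySem.List.pyGetD anno_sent idx "") = "-S" then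
      if pvTail2 (PySem.List.pyGetD pos idx "") ≠ "-B" then
        PySem.List.pySetD pos idx (pvFixB (PySem.List.pyGetD pos idx ""))
      else pos
    else pos
  if (pvTail2 (PySem.List.pyGetD anno_sent idx "") = "-E" ∨
      pvTail2 (PySem.List.pyGetD anno_sent idx "") = "-S") ∧ idx + 1 < PySem.List.len pos1 then
    if pvTail2 (PySem.List.pyGetD pos1 (idx + 1) "") ≠ "-B" then
      PySem.List.pySetD pos1 (idx + 1) (pvFixB (PySem.List.pyGetD pos1 (idx + 1) ""))
    else pos1
  else pos1

def modify_wordBoundary_with_hyperBoundary (pos_sent : List String) (anno_sent : List String) : List String :=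
  let pos0 := pos_sent.map pvRepl
  (PySem.List.enumerate anno_sent).foldl (pvStepA anno_sent) pos0

-- ===== PORT B =====
-- B's loop body: state = (out, carry, remaining annotation tags); a? plays next(ann, None)
def pvStepB (st : List String × Bool × List String) (tok : String) : List String × Bool × List String :=
  let a? := st.2.2.head?
  let t0 := pvRepl tok
  let t := if (st.2.1 || (match a? with
                          | some a => PySem.Str.endswith a "-B" || PySem.Str.endswith a "-S"
                          | none => false)) && !(PySem.Str.endswith t0 "-B")
           then pvFixB t0 else t0
  (st.1 ++ [t],
   (match a? with
    | some a => PySem.Str.endswith a "-E" || PySem.Str.endswith a "-S"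
    | none => false),
   st.2.2.tail)

def modify_wordBoundary_with_hyperBoundary_alt (pos_sent : List String) (anno_sent : List String) : List String :=
  (pos_sent.foldl pvStepB ([], false, anno_sent)).1

-- ===== PRECONDITION & SPEC =====
-- Pre_ excludes exactly the inputs where Python A raises IndexError: some annotation tag at an
-- index ≥ len(pos_sent) ends in '-B' or '-S', making A read past the end of pos_sent.
def Pre_modify_wordBoundary_with_hyperBoundary (pos_sent : List String) (anno_sent : List String) : Prop :=
  ∀ s ∈ anno_sent.drop pos_sent.length, ¬ (pvTail2 s = "-B" ∨ pvTail2 s = "-S")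
instance (pos_sent : List String) (anno_sent : List String) : Decidable (Pre_modify_wordBoundary_with_hyperBoundary pos_sent anno_sent) := by unfold Pre_modify_wordBoundary_with_hyperBoundary; infer_instance

def pvWitness_modify_wordBoundary_with_hyperBoundary : List String × List String :=
  (["NN-S", "VB-E", "DT"], ["x-B", "x-E", "y-S"])

def Spec_modify_wordBoundary_with_hyperBoundary (pos_sent : List String) (anno_sent : List String) (out : List String) : Prop := out = modify_wordBoundary_with_hyperBoundary_alt pos_sent anno_sent
instance (pos_sent : List String) (anno_sent : List String) (out : List String) : Decidable (Spec_modify_wordBoundary_with_hyperBoundary pos_sent anno_sent out) := by unfold Spec_modify_wordBoundary_with_hyperBoundary; infer_instance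

-- ===== CLAIM (what is proved, stated in full; the proofs are below) =====
def Claim_equal_modify_wordBoundary_with_hyperBoundary : Prop := ∀ (pos_sent : List String) (anno_sent : List String), Dom_modify_wordBoundary_with_hyperBoundary pos_sent anno_sent → Pre_modify_wordBoundary_with_hyperBoundary pos_sent anno_sent → Spec_modify_wordBoundary_with_hyperBoundary pos_sent anno_sent (modify_wordBoundary_with_hyperBoundary pos_sent anno_sent)

-- ===== LEMMAS AND PROOFS =====

-- the adjusted tag list, described pointwise
def pvP0 (pos : List String) : List String := pos.map pvRepl
def pvEndsBS (anno : List String) (j : Nat) : Bool :=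
  pvTail2 (anno.getD j "") == "-B" || pvTail2 (anno.getD j "") == "-S"
def pvEndsES (anno : List String) (j : Nat) : Bool :=
  pvTail2 (anno.getD j "") == "-E" || pvTail2 (anno.getD j "") == "-S"
def pvPrev (anno : List String) (j : Nat) : Bool := decide (0 < j) && pvEndsES anno (j - 1)
def pvMark (anno : List String) (j : Nat) : Bool := pvEndsBS anno j || pvPrev anno j
def pvApply (m : Bool) (t : String) : String :=
  if m && !(pvTail2 t == "-B") then pvFixB t else t
def pvOut (pos anno : List String) (j : Nat) : String :=
  pvApply (pvMark anno j) ((pvP0 pos).getD j "")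
def pvMid (pos anno : List String) (k : Nat) : String :=
  pvApply (pvPrev anno k) ((pvP0 pos).getD k "")

-- invariant at entry of A's iteration k
def pvEntry (pos anno : List String) (k : Nat) (st : List String) : Prop :=
  st.length = pos.length ∧ ∀ j : Nat, j < pos.length →
    (j < k → st.getD j "" = pvOut pos anno j) ∧
    (j = k → st.getD j "" = pvMid pos anno k) ∧
    (k < j → st.getD j "" = (pvP0 pos).getD j "")

lemma pvTail2_empty : pvTail2 "" = "" := by decide

lemma pvTail2_toList (s : String) :
    (pvTail2 s).toList = s.toList.drop (s.toList.length - 2) := by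
  unfold pvTail2
  simp only [PySem.Str.toList_slice, PySem.Chars.slice_eq_listSlice]
  rw [PySem.List.slice_from_neg_ofNat _ 2 (by omega)]

lemma pvTail2_fixB (s : String) : pvTail2 (pvFixB s) = "-B" := by
  apply String.toList_inj.mp
  rw [pvTail2_toList]
  unfold pvFixB
  simp only [String.toList_append]
  have hb : ("-B" : String).toList = ['-', 'B'] := by decide
  rw [hb]
  simp

-- s.endswith(p) for a two-character pattern p is exactly 's[-2:] == p'
lemma pvEnds2 (s p : String) (hp : p.toList.length = 2) :
    PySem.Str.endswith s p = (pvTail2 s == p) := by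
  rw [Bool.eq_iff_iff, beq_iff_eq]
  have h1 : PySem.Str.endswith s p = true ↔ p.toList <:+ s.toList := by
    simp [PySem.Chars.endswith_iff]
  rw [h1, List.suffix_iff_eq_drop, hp]
  constructor
  · intro h
    apply String.toList_inj.mp
    rw [pvTail2_toList, ← h]
  · intro h
    rw [← String.toList_inj.mpr h, pvTail2_toList]

lemma pvEndsBS_oob (anno : List String) (j : Nat) (h : anno.length ≤ j) : pvEndsBS anno j = false := by
  unfold pvEndsBS
  rw [List.getD_eq_getElem?_getD, List.getElem?_eq_none (by omega), Option.getD_none, pvTail2_empty]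
  decide

lemma pvEndsES_oob (anno : List String) (j : Nat) (h : anno.length ≤ j) : pvEndsES anno j = false := by
  unfold pvEndsES
  rw [List.getD_eq_getElem?_getD, List.getElem?_eq_none (by omega), Option.getD_none, pvTail2_empty]
  decide

lemma pvApply_eq (m : Bool) (t : String) :
    pvApply m t = if m = true ∧ pvTail2 t ≠ "-B" then pvFixB t else t := by
  unfold pvApply
  by_cases h1 : m = true <;> by_cases h2 : pvTail2 t = "-B" <;> simp [h1, h2]

lemma pvGetD_set_self (l : List String) (i : Nat) (v : String) (h : i < l.length) :
    (l.set i v).getD i "" = v := by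
  rw [List.getD_eq_getElem?_getD, List.getElem?_set_self (by omega)]; rfl

lemma pvGetD_set_ne (l : List String) (i j : Nat) (v : String) (h : i ≠ j) :
    (l.set i v).getD j "" = l.getD j "" := by
  rw [List.getD_eq_getElem?_getD, List.getElem?_set_ne h, ← List.getD_eq_getElem?_getD]

lemma pvStepA_char (anno st : List String) (k : Nat) (t : String) :
    (pvStepA anno st ((k : Int), t)).length = st.length ∧
    ∀ j : Nat, (pvStepA anno st ((k : Int), t)).getD j "" =
      if j = k ∧ k < st.length ∧ pvEndsBS anno k = true ∧ pvTail2 (st.getD k "") ≠ "-B" then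
        pvFixB (st.getD k "")
      else if j = k + 1 ∧ k + 1 < st.length ∧ pvEndsES anno k = true ∧ pvTail2 (st.getD (k+1) "") ≠ "-B" then
        pvFixB (st.getD (k+1) "")
      else st.getD j "" := by
  have hBS : (pvTail2 (anno.getD k "") = "-B" ∨ pvTail2 (anno.getD k "") = "-S") ↔ pvEndsBS anno k = true := by
    simp [pvEndsBS]
  have hES : (pvTail2 (anno.getD k "") = "-E" ∨ pvTail2 (anno.getD k "") = "-S") ↔ pvEndsES anno k = true := by
    simp [pvEndsES]
  unfold pvStepA
  simp only [PySem.List.pyGetD_natCast, PySem.List.pySetD_natCast, PySem.List.len_eq,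
    show ((k : Int) + 1) = (((k+1 : Nat)) : Int) by push_cast; ring, hBS, hES, Nat.cast_lt]
  set p1 := (if pvEndsBS anno k = true then
      if pvTail2 (st.getD k "") ≠ "-B" then st.set k (pvFixB (st.getD k "")) else st
    else st) with hp1
  have hlen1 : p1.length = st.length := by rw [hp1]; split_ifs <;> simp
  have h1ne : ∀ j : Nat, j ≠ k → p1.getD j "" = st.getD j "" := by
    intro j hj; rw [hp1]; split_ifs with h1 h2
    · exact pvGetD_set_ne _ _ _ _ (Ne.symm hj)
    · rfl
    · rfl
  have h1k : p1.getD k "" =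
      if k < st.length ∧ pvEndsBS anno k = true ∧ pvTail2 (st.getD k "") ≠ "-B" then
        pvFixB (st.getD k "") else st.getD k "" := by
    rw [hp1]
    by_cases hA : pvEndsBS anno k = true
    · by_cases hT : pvTail2 (st.getD k "") ≠ "-B"
      · by_cases hin : k < st.length
        · rw [if_pos hA, if_pos hT, if_pos ⟨hin, hA, hT⟩]
          exact pvGetD_set_self _ _ _ hin
        · rw [if_pos hA, if_pos hT, List.set_eq_of_length_le (by omega),
            if_neg (by rintro ⟨h, -⟩; exact hin h)]
      · rw [if_pos hA, if_neg hT, if_neg (by rintro ⟨-, -, h⟩; exact hT h)]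
    · rw [if_neg hA, if_neg (by rintro ⟨-, h, -⟩; exact hA h)]
  have h1k1 : p1.getD (k+1) "" = st.getD (k+1) "" := h1ne _ (by omega)
  rw [hlen1, h1k1]
  set p2 := (if pvEndsES anno k = true ∧ k + 1 < st.length then
      if pvTail2 (st.getD (k+1) "") ≠ "-B" then p1.set (k+1) (pvFixB (st.getD (k+1) "")) else p1
    else p1) with hp2
  have hlen2 : p2.length = st.length := by rw [hp2]; split_ifs <;> simp [hlen1]
  have h2ne : ∀ j : Nat, j ≠ k + 1 → p2.getD j "" = p1.getD j "" := by
    intro j hj; rw [hp2]; split_ifs with h1 h2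
    · exact pvGetD_set_ne _ _ _ _ (Ne.symm hj)
    · rfl
    · rfl
  have h2k1 : p2.getD (k+1) "" =
      if k + 1 < st.length ∧ pvEndsES anno k = true ∧ pvTail2 (st.getD (k+1) "") ≠ "-B" then
        pvFixB (st.getD (k+1) "") else st.getD (k+1) "" := by
    rw [hp2]
    by_cases hO : pvEndsES anno k = true ∧ k + 1 < st.length
    · by_cases hT : pvTail2 (st.getD (k+1) "") ≠ "-B"
      · rw [if_pos hO, if_pos hT, if_pos ⟨hO.2, hO.1, hT⟩]
        exact pvGetD_set_self _ _ _ (by omega)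
      · rw [if_pos hO, if_neg hT, if_neg (by rintro ⟨-, -, h⟩; exact hT h), h1k1]
    · rw [if_neg hO, if_neg (by rintro ⟨h1, h2, -⟩; exact hO ⟨h2, h1⟩), h1k1]
  refine ⟨hlen2, ?_⟩
  intro j
  by_cases hjk : j = k
  · subst hjk
    rw [h2ne j (by omega), h1k]
    by_cases hc : j < st.length ∧ pvEndsBS anno j = true ∧ pvTail2 (st.getD j "") ≠ "-B"
    · rw [if_pos hc, if_pos ⟨rfl, hc⟩]
    · rw [if_neg hc, if_neg (fun h => hc h.2), if_neg (by rintro ⟨h, -⟩; omega)]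
  · by_cases hjk1 : j = k + 1
    · subst hjk1
      rw [h2k1]
      by_cases hc : k + 1 < st.length ∧ pvEndsES anno k = true ∧ pvTail2 (st.getD (k+1) "") ≠ "-B"
      · rw [if_pos hc, if_neg (by rintro ⟨h, -⟩; omega), if_pos ⟨rfl, hc⟩]
      · rw [if_neg hc, if_neg (by rintro ⟨h, -⟩; omega), if_neg (fun h => hc h.2)]
    · rw [h2ne _ hjk1, h1ne _ hjk, if_neg (by rintro ⟨h, -⟩; exact hjk h),
        if_neg (by rintro ⟨h, -⟩; exact hjk1 h)]

lemma pvStepA_entry (pos anno : List String) (k : Nat) (st : List String) (t : String)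
    (h : pvEntry pos anno k st) :
    pvEntry pos anno (k + 1) (pvStepA anno st ((k : Int), t)) := by
  obtain ⟨hlen, hj⟩ := h
  obtain ⟨hlen', hget⟩ := pvStepA_char anno st k t
  refine ⟨hlen'.trans hlen, ?_⟩
  intro j hjn
  refine ⟨?_, ?_, ?_⟩
  · -- j < k + 1
    intro hlt
    by_cases hjk : j = k
    · subst hjk
      have hkst : j < st.length := by omega
      have hmid : st.getD j "" = pvMid pos anno j := (hj j hjn).2.1 rfl
      rw [hget j, hmid]
      unfold pvMid pvOut
      simp only [pvApply_eq]
      set p0j := (pvP0 pos).getD j "" with hp0j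
      by_cases hP : pvPrev anno j = true ∧ pvTail2 p0j ≠ "-B"
      · rw [if_pos hP, pvTail2_fixB]
        rw [if_neg (by rintro ⟨-, -, -, h⟩; exact h rfl), if_neg (by rintro ⟨h, -⟩; omega),
          if_pos ⟨by simp [pvMark, hP.1], hP.2⟩]
      · rw [if_neg hP]
        by_cases hBSk : pvEndsBS anno j = true
        · by_cases hT : pvTail2 p0j ≠ "-B"
          · have hcond : True ∧ j < st.length ∧ pvEndsBS anno j = true ∧ pvTail2 p0j ≠ "-B" :=
              ⟨trivial, hkst, hBSk, hT⟩
            rw [if_pos hcond, if_pos ⟨by simp [pvMark, hBSk], hT⟩]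
          · rw [if_neg (by rintro ⟨-, -, -, h⟩; exact hT h), if_neg (by rintro ⟨h, -⟩; omega),
              if_neg (by rintro ⟨-, h⟩; exact hT h)]
        · rw [if_neg (by rintro ⟨-, -, h, -⟩; exact hBSk h), if_neg (by rintro ⟨h, -⟩; omega)]
          rw [if_neg (by
            rintro ⟨hm, hT⟩
            rcases Bool.or_eq_true_iff.mp (by simpa [pvMark] using hm) with h | h
            · exact hBSk h
            · exact hP ⟨h, hT⟩)]
    · have hjlt : j < k := by omega
      rw [hget j, if_neg (by rintro ⟨h, -⟩; exact hjk h), if_neg (by rintro ⟨h, -⟩; omega)]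
      exact (hj j hjn).1 hjlt
  · -- j = k + 1
    intro hj1
    subst hj1
    have hst1 : st.getD (k+1) "" = (pvP0 pos).getD (k+1) "" := (hj (k+1) hjn).2.2 (by omega)
    rw [hget (k+1), if_neg (by rintro ⟨h, -⟩; omega), hst1]
    unfold pvMid
    rw [pvApply_eq]
    have hprev : pvPrev anno (k+1) = pvEndsES anno k := by simp [pvPrev]
    rw [hprev]
    by_cases hc : pvEndsES anno k = true ∧ pvTail2 ((pvP0 pos).getD (k+1) "") ≠ "-B"
    · have hcond : k + 1 = k + 1 ∧ k + 1 < st.length ∧ pvEndsES anno k = true ∧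
          pvTail2 ((pvP0 pos).getD (k+1) "") ≠ "-B" := ⟨rfl, by omega, hc.1, hc.2⟩
      rw [if_pos hcond, if_pos hc]
    · rw [if_neg (by rintro ⟨-, -, h1, h2⟩; exact hc ⟨h1, h2⟩), if_neg hc]
  · -- k + 1 < j
    intro hgt
    rw [hget j, if_neg (by rintro ⟨h, -⟩; omega), if_neg (by rintro ⟨h, -⟩; omega)]
    exact (hj j hjn).2.2 (by omega)

lemma pvLoopA (pos anno : List String) :
    ∀ (suf : List String) (k : Nat) (st : List String),
      anno.drop k = suf → pvEntry pos anno k st →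
      pvEntry pos anno (k + suf.length) ((PySem.List.enumerate suf (k : Int)).foldl (pvStepA anno) st) := by
  intro suf
  induction suf with
  | nil => intro k st _ h; simpa [PySem.List.enumerate_nil] using h
  | cons a rest ih =>
    intro k st hdrop h
    rw [PySem.List.enumerate_cons, List.foldl_cons]
    have hdrop' : anno.drop (k + 1) = rest := by
      rw [← List.tail_drop, hdrop, List.tail_cons]
    have hcast : (k : Int) + 1 = ((k + 1 : Nat) : Int) := by push_cast; ring
    rw [hcast, show k + (a :: rest).length = (k + 1) + rest.length from by simp; omega]
    exact ih (k + 1) _ hdrop' (pvStepA_entry pos anno k st a h)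

lemma pvEntry_final (pos anno : List String) (k : Nat) (st : List String)
    (hk : anno.length ≤ k) (h : pvEntry pos anno k st) :
    st = (List.range pos.length).map (pvOut pos anno) := by
  obtain ⟨hlen, hj⟩ := h
  apply List.ext_getElem (by simp [hlen])
  intro i h1 h2
  have hi : i < pos.length := by simpa using h2
  have hg : st.getD i "" = st[i] := by
    rw [List.getD_eq_getElem?_getD, List.getElem?_eq_getElem h1]; rfl
  rw [List.getElem_map, List.getElem_range, ← hg]
  rcases lt_trichotomy i k with hik | hik | hik
  · exact (hj i hi).1 hik
  · subst hik
    rw [(hj i hi).2.1 rfl]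
    unfold pvMid pvOut
    rw [show pvMark anno i = pvPrev anno i from by
      simp [pvMark, pvEndsBS_oob anno i hk]]
  · rw [(hj i hi).2.2 hik]
    unfold pvOut
    rw [show pvMark anno i = false from by
      simp [pvMark, pvEndsBS_oob anno i (by omega), pvPrev, pvEndsES_oob anno (i-1) (by omega)]]
    simp [pvApply]

-- the option read from the remaining annotation stream, as the Bool tests B makes
lemma pvHeadBS (anno : List String) (k : Nat) :
    (match (anno.drop k).head? with
     | some a => PySem.Str.endswith a "-B" || PySem.Str.endswith a "-S"
     | none => false) = pvEndsBS anno k := by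
  rw [List.head?_drop]
  by_cases hk : k < anno.length
  · rw [List.getElem?_eq_getElem hk]
    unfold pvEndsBS
    rw [List.getD_eq_getElem?_getD, List.getElem?_eq_getElem hk]
    simp only [Option.getD_some]
    rw [pvEnds2 _ "-B" (by decide), pvEnds2 _ "-S" (by decide)]
  · rw [List.getElem?_eq_none (by omega), pvEndsBS_oob anno k (by omega)]

lemma pvHeadES (anno : List String) (k : Nat) :
    (match (anno.drop k).head? with
     | some a => PySem.Str.endswith a "-E" || PySem.Str.endswith a "-S"
     | none => false) = pvEndsES anno k := by
  rw [List.head?_drop]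
  by_cases hk : k < anno.length
  · rw [List.getElem?_eq_getElem hk]
    unfold pvEndsES
    rw [List.getD_eq_getElem?_getD, List.getElem?_eq_getElem hk]
    simp only [Option.getD_some]
    rw [pvEnds2 _ "-E" (by decide), pvEnds2 _ "-S" (by decide)]
  · rw [List.getElem?_eq_none (by omega), pvEndsES_oob anno k (by omega)]

-- B's fold, unrolled one step against the pointwise description
lemma pvLoopB (pos anno : List String) :
    ∀ (suf : List String) (k : Nat), pos.drop k = suf → k ≤ pos.length →
      (suf.foldl pvStepB
        ((List.range k).map (pvOut pos anno), pvPrev anno k, anno.drop k)).1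
        = (List.range pos.length).map (pvOut pos anno) := by
  intro suf
  induction suf with
  | nil =>
    intro k hdrop hk
    have : pos.length ≤ k := by
      by_contra hlt
      have := List.drop_eq_nil_iff.mp hdrop
      omega
    have hkeq : k = pos.length := by omega
    subst hkeq
    rfl
  | cons tok rest ih =>
    intro k hdrop hk
    have hklt : k < pos.length := by
      have := congrArg List.length hdrop
      simp at this
      omega
    have hc : pos[k] :: pos.drop (k+1) = tok :: rest := by
      rw [← List.drop_eq_getElem_cons hklt, hdrop]
    have htok : pos[k] = tok := (List.cons.injEq _ _ _ _ ▸ hc).1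
    have hdrop' : pos.drop (k + 1) = rest := (List.cons.injEq _ _ _ _ ▸ hc).2
    rw [List.foldl_cons]
    have hstep : pvStepB ((List.range k).map (pvOut pos anno), pvPrev anno k, anno.drop k) tok
        = ((List.range (k+1)).map (pvOut pos anno), pvPrev anno (k+1), anno.drop (k+1)) := by
      unfold pvStepB
      simp only
      rw [pvHeadBS, pvHeadES, List.tail_drop]
      have hcarry : pvPrev anno (k + 1) = pvEndsES anno k := by simp [pvPrev]
      rw [← hcarry]
      have hmark : (pvPrev anno k || pvEndsBS anno k) = pvMark anno k := by
        unfold pvMark; rw [Bool.or_comm]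
      rw [hmark]
      have hEB : PySem.Str.endswith (pvRepl tok) "-B" = (pvTail2 (pvRepl tok) == "-B") :=
        pvEnds2 _ "-B" (by decide)
      rw [hEB]
      have hout : pvOut pos anno k =
          (if (pvMark anno k && !(pvTail2 (pvRepl tok) == "-B")) = true
           then pvFixB (pvRepl tok) else pvRepl tok) := by
        unfold pvOut pvApply
        rw [show (pvP0 pos).getD k "" = pvRepl tok from by
          rw [List.getD_eq_getElem?_getD, List.getElem?_eq_getElem (by simpa [pvP0] using hklt)]
          simp [pvP0, htok]]
      rw [List.range_succ, List.map_append, List.map_cons, List.map_nil, hout]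
    rw [hstep]
    exact ih (k + 1) hdrop' (by omega)

lemma pvAltB (pos anno : List String) :
    modify_wordBoundary_with_hyperBoundary_alt pos anno
      = (List.range pos.length).map (pvOut pos anno) := by
  unfold modify_wordBoundary_with_hyperBoundary_alt
  have h0 := pvLoopB pos anno pos 0 (by simp) (by omega)
  simpa [pvPrev] using h0

lemma pvMain (pos anno : List String) :
    (PySem.List.enumerate anno).foldl (pvStepA anno) (pos.map pvRepl)
      = modify_wordBoundary_with_hyperBoundary_alt pos anno := by
  rw [pvAltB]
  have h0 : pvEntry pos anno 0 (pos.map pvRepl) := by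
    refine ⟨by simp, ?_⟩
    intro j hj
    refine ⟨fun h => absurd h (by omega), ?_, fun _ => rfl⟩
    intro hj0; subst hj0
    unfold pvMid
    rw [show pvPrev anno 0 = false from by simp [pvPrev]]
    simp [pvApply, pvP0]
  have hloop := pvLoopA pos anno anno 0 (pos.map pvRepl) (by simp) h0
  rw [show ((0 : Nat) : Int) = 0 from rfl] at hloop
  exact pvEntry_final pos anno _ _ (by simp) hloop

-- ===== VERDICT (by name: the statement is the Claim_ definition above) =====
theorem modify_wordBoundary_with_hyperBoundary_spec : Claim_equal_modify_wordBoundary_with_hyperBoundary := by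
  intro pos anno _ _
  unfold Spec_modify_wordBoundary_with_hyperBoundary modify_wordBoundary_with_hyperBoundary
  exact pvMain pos anno
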